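-- pv_equiv track=rewrite | github.com/0xJ0EY/ISCRIPT | oplevering3/doubledutch.py | vertaalWoord
-- ===== SOURCE A (Python) =====
-- klinkers = ["a", "e", "i", "o", "u"]
--
-- def vertaalWoord(word, consonants):
--
--     output = []
--
--     previous_is_vowel = False
--
--     for i, char in enumerate(list(word)):
--         is_upper = char.isupper()
--         char = char.lower()
--         in_vowel = char in klinkers
--
--         item = ""
--
--         if (in_vowel):
--             if (previous_is_vowel):
--                 # Remove last item
--                 last_item = output.pop()
--                 item = 'squat' + char + 'h'
--
--             else:
--                 item = char
--         else:
--             item = consonants[char]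
--
--         if (is_upper):
--             item = item.capitalize()
--
--         output.append(item)
--         previous_is_vowel = in_vowel
--
--     return ''.join(output)
-- ===== SOURCE B (Python) =====
-- klinkers = ["a", "e", "i", "o", "u"]
--
-- def vertaalWoord(word, consonants):
--     # Single lookahead pass: a vowel followed by another vowel contributes nothing
--     # (A would pop it); no mutation/pop of the output list.
--     chars = list(word)
--     n = len(chars)
--     pieces = []
--     prev_vowel = False
--     for i in range(n):
--         ch = chars[i]
--         low = ch.lower()
--         if low in klinkers:
--             next_is_vowel = i + 1 < n and chars[i + 1].lower() in klinkers
--             if not next_is_vowel: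
--                 piece = ('squat' + low + 'h') if prev_vowel else low
--                 pieces.append(piece.capitalize() if ch.isupper() else piece)
--             prev_vowel = True
--         else:
--             piece = consonants[low]
--             pieces.append(piece.capitalize() if ch.isupper() else piece)
--             prev_vowel = False
--     return ''.join(pieces)
-- ===== Notes on version B (the rewrite author's own statement) =====
-- stated objective: alternative
-- what changed: Replaces A's append-then-pop scan (a vowel after a vowel pops the previous output item) by a single lookahead pass that never mutates the output: a vowel followed by another vowel emits nothing, otherwise it emits the char or 'squat'+char+'h' per the previous-vowel flag.
-- outside the precondition, e.g. on vertaalWoord('x', {'b': 'bob'}): A raises KeyError, B raises KeyError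
import Mathlib
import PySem

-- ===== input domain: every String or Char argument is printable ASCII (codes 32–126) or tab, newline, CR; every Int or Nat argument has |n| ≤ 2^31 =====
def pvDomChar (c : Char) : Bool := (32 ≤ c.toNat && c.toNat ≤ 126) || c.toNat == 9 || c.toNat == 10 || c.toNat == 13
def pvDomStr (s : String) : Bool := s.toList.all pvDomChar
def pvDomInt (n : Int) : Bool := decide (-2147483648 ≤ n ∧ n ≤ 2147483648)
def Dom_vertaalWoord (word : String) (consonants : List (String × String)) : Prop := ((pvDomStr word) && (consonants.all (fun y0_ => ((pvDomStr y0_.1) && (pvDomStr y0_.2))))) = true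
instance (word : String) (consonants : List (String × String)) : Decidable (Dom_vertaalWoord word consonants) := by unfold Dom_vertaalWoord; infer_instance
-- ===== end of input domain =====

-- B replaces A's append-then-pop scan by a single lookahead pass (a vowel followed by a vowel
-- emits nothing), removing the output-list mutation; same cost, different decomposition.


-- ===== PORT A =====
-- shared helpers (the same Python built-ins appear in both sources)
def pvVowel (c : Char) : Bool := c ∈ ['a', 'e', 'i', 'o', 'u']   -- char in klinkers

-- str.capitalize(): first char uppercased, the rest lowercased (exact on ASCII)
def pvCapitalize (s : String) : String :=
  match s.toList with
  | [] => ""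
  | c :: cs => String.ofList (PySem.Chars.upperChar c :: cs.map PySem.Chars.lowerChar)

-- the loop of A: state = (output list, previous_is_vowel); output.pop() is dropLast
-- (output is provably nonempty there: the previous iteration appended an item)
def vertaalWoordGo (consonants : List (String × String)) (output : List String)
    (prev : Bool) : List Char → List String
  | [] => output
  | c :: rest =>
    let isUp := PySem.Chars.isupper c
    let cl := PySem.Chars.lowerChar c
    let inVowel := pvVowel cl
    let st : List String × String :=
      if inVowel then
        if prev then (output.dropLast, "squat" ++ String.ofList [cl] ++ "h")
        else (output, String.ofList [cl])
      else (output, ((PySem.Dict.mk consonants).get? (String.ofList [cl])).getD "")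
    let item := if isUp then pvCapitalize st.2 else st.2
    vertaalWoordGo consonants (st.1 ++ [item]) inVowel rest

def vertaalWoord (word : String) (consonants : List (String × String)) : String :=
  PySem.Str.join "" (vertaalWoordGo consonants [] false word.toList)

-- ===== PORT B =====
def pvNextIsVowel : List Char → Bool
  | [] => false
  | d :: _ => pvVowel (PySem.Chars.lowerChar d)

-- the loop of B: lookahead at the next char, no mutation of the emitted list
def vertaalWoordAltGo (consonants : List (String × String)) (prev : Bool) :
    List Char → List String
  | [] => []
  | c :: rest =>
    let cl := PySem.Chars.lowerChar c
    if pvVowel cl then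
      if pvNextIsVowel rest then vertaalWoordAltGo consonants true rest
      else
        let piece := if prev then "squat" ++ String.ofList [cl] ++ "h" else String.ofList [cl]
        (if PySem.Chars.isupper c then pvCapitalize piece else piece) ::
          vertaalWoordAltGo consonants true rest
    else
      let piece := ((PySem.Dict.mk consonants).get? (String.ofList [cl])).getD ""
      (if PySem.Chars.isupper c then pvCapitalize piece else piece) ::
        vertaalWoordAltGo consonants false rest

def vertaalWoord_alt (word : String) (consonants : List (String × String)) : String :=
  PySem.Str.join "" (vertaalWoordAltGo consonants false word.toList)

-- ===== PRECONDITION & SPEC =====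
-- A raises KeyError when a non-vowel character's lowercase form is not a key of consonants;
-- Pre_ excludes exactly those inputs.
def Pre_vertaalWoord (word : String) (consonants : List (String × String)) : Prop :=
  (word.toList.all (fun c =>
    pvVowel (PySem.Chars.lowerChar c) ||
      ((PySem.Dict.mk consonants).get? (String.ofList [PySem.Chars.lowerChar c])).isSome)) = true

instance (word : String) (consonants : List (String × String)) : Decidable (Pre_vertaalWoord word consonants) := by unfold Pre_vertaalWoord; infer_instance

def pvWitness_vertaalWoord : String × (List (String × String)) := ("aAb", [("b", "bob")])

def Spec_vertaalWoord (word : String) (consonants : List (String × String)) (out : String) : Prop := out = vertaalWoord_alt word consonants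
instance (word : String) (consonants : List (String × String)) (out : String) : Decidable (Spec_vertaalWoord word consonants out) := by unfold Spec_vertaalWoord; infer_instance

-- ===== CLAIM (what is proved, stated in full; the proofs are below) =====
def Claim_equal_vertaalWoord : Prop := ∀ (word : String) (consonants : List (String × String)), Dom_vertaalWoord word consonants → Pre_vertaalWoord word consonants → Spec_vertaalWoord word consonants (vertaalWoord word consonants)

-- ===== LEMMAS AND PROOFS =====

@[simp] lemma pvNextIsVowel_cons (c : Char) (rest : List Char) :
    pvNextIsVowel (c :: rest) = pvVowel (PySem.Chars.lowerChar c) := rfl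

-- A's loop equals B's loop: the items A later pops are exactly the ones B never emits.
lemma vertaalWoordGo_eq (consonants : List (String × String)) :
    ∀ (cs : List Char) (out : List String) (x : String),
      vertaalWoordGo consonants out false cs = out ++ vertaalWoordAltGo consonants false cs ∧
      vertaalWoordGo consonants (out ++ [x]) true cs =
        out ++ (if pvNextIsVowel cs then [] else [x]) ++ vertaalWoordAltGo consonants true cs := by
  intro cs
  induction cs with
  | nil =>
      intro out x
      simp [vertaalWoordGo, vertaalWoordAltGo, pvNextIsVowel]
  | cons c rest ih =>
      intro out x
      by_cases hv : pvVowel (PySem.Chars.lowerChar c) = true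
      · constructor
        · -- prev = false, c vowel
          rw [show vertaalWoordGo consonants out false (c :: rest) =
              vertaalWoordGo consonants
                (out ++ [if PySem.Chars.isupper c then
                    pvCapitalize (String.ofList [PySem.Chars.lowerChar c])
                  else String.ofList [PySem.Chars.lowerChar c]]) true rest by
              simp [vertaalWoordGo, hv]]
          rw [(ih out _).2]
          by_cases hn : pvNextIsVowel rest = true <;>
            simp [vertaalWoordAltGo, hv, hn, List.append_assoc]
        · -- prev = true, c vowel: pop x, append the squat item
          rw [show vertaalWoordGo consonants (out ++ [x]) true (c :: rest) =
              vertaalWoordGo consonants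
                (out ++ [if PySem.Chars.isupper c then
                    pvCapitalize ("squat" ++ String.ofList [PySem.Chars.lowerChar c] ++ "h")
                  else "squat" ++ String.ofList [PySem.Chars.lowerChar c] ++ "h"]) true rest by
              simp [vertaalWoordGo, hv]]
          rw [(ih out _).2, pvNextIsVowel_cons]
          by_cases hn : pvNextIsVowel rest = true <;>
            simp [vertaalWoordAltGo, hv, hn, List.append_assoc]
      · -- c consonant: both emit the mapped item
        have hstep : ∀ (o : List String), vertaalWoordGo consonants o false (c :: rest) =
            vertaalWoordGo consonants
              (o ++ [if PySem.Chars.isupper c then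
                  pvCapitalize (((PySem.Dict.mk consonants).get?
                    (String.ofList [PySem.Chars.lowerChar c])).getD "")
                else ((PySem.Dict.mk consonants).get?
                  (String.ofList [PySem.Chars.lowerChar c])).getD ""]) false rest := by
          intro o; simp [vertaalWoordGo, hv]
        have hstep2 : vertaalWoordGo consonants (out ++ [x]) true (c :: rest) =
            vertaalWoordGo consonants
              ((out ++ [x]) ++ [if PySem.Chars.isupper c then
                  pvCapitalize (((PySem.Dict.mk consonants).get?
                    (String.ofList [PySem.Chars.lowerChar c])).getD "")
                else ((PySem.Dict.mk consonants).get?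
                  (String.ofList [PySem.Chars.lowerChar c])).getD ""]) false rest := by
          simp [vertaalWoordGo, hv]
        constructor
        · rw [hstep out, (ih _ x).1]
          simp [vertaalWoordAltGo, hv, List.append_assoc]
        · rw [hstep2, (ih _ x).1]
          simp [vertaalWoordAltGo, hv, pvNextIsVowel, List.append_assoc]

-- ===== VERDICT (by name: the statement is the Claim_ definition above) =====
theorem vertaalWoord_spec : Claim_equal_vertaalWoord := by
  intro word consonants _ _
  unfold Spec_vertaalWoord vertaalWoord vertaalWoord_alt
  rw [(vertaalWoordGo_eq consonants word.toList [] "").1]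
  simp
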